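-- pv_equiv track=rewrite | github.com/Mnemo-mcp/Mnemo | mnemo/engine/clustering.py | _pick_community_name
-- ===== SOURCE A (Python) =====
-- def _pick_community_name(community: set, index: int) -> str:
--     """Pick a human-readable name for a community based on file paths."""
--     paths = set()
--     for node_id in community:
--         parts = node_id.split(":")
--         if len(parts) >= 2:
--             filepath = parts[0] if "/" in parts[0] else ""
--             if filepath:
--                 segments = filepath.split("/")
--                 # Use up to 3 segments for better naming
--                 paths.add("/".join(segments[:min(3, len(segments))]))
--
--     if not paths:
--         return f"cluster-{index}"
--
--     sorted_paths = sorted(paths)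
--     if len(sorted_paths) == 1:
--         return sorted_paths[0].replace("/", "-") or f"cluster-{index}"
--
--     # Find the most common deepest shared prefix
--     from collections import Counter
--     tops = Counter(p for p in sorted_paths)
--     if tops:
--         # Pick the most common path prefix
--         best = tops.most_common(1)[0][0]
--         return best.replace("/", "-")
--
--     return f"cluster-{index}"
-- ===== SOURCE B (Python) =====
-- def _pick_community_name(community: set, index: int) -> str:
--     """Pick a human-readable name for a community based on file paths."""
--     best = None
--     for node_id in community:
--         parts = node_id.split(":")
--         if len(parts) >= 2 and "/" in parts[0]:
--             prefix = "/".join(parts[0].split("/")[:3])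
--             if best is None or prefix < best:
--                 best = prefix
--     if best is None:
--         return f"cluster-{index}"
--     return best.replace("/", "-")
-- ===== Notes on version B (the rewrite author's own statement) =====
-- stated objective: simpler
-- what changed: Replaces the collect-into-set, sort, len-branch and Counter.most_common pipeline by a single pass that keeps a running lexicographic minimum prefix (the sorted/Counter machinery of A always ends up selecting the smallest prefix, since the deduplicated counts are all 1 and ties keep sorted order).
import Mathlib
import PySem

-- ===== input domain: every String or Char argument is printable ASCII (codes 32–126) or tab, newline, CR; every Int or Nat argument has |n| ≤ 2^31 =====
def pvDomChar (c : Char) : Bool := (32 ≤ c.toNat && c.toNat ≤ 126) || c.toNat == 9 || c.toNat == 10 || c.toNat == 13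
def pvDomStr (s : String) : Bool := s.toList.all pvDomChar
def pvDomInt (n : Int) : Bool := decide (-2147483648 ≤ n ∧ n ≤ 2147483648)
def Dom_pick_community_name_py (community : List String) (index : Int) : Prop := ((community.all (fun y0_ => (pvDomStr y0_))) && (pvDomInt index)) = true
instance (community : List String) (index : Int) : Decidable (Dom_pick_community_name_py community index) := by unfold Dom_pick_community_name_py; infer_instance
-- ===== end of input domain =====

-- B replaces A's collect-into-set + sort + Counter pipeline by a single pass keeping a running
-- lexicographic-minimum prefix (objective: simpler). A's Python takes a set; it is modelled as the
-- list of its distinct elements, and the result is order-independent.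

-- ===== PORT A =====
def pick_community_name_py (community : List String) (index : Int) : String :=
  let paths : PySem.Set (List Char) := community.foldl (fun paths node_id =>
    let parts := PySem.Chars.splitOn node_id.toList [':']
    if 2 ≤ parts.length then
      let filepath := if PySem.Chars.isIn ['/'] (PySem.List.pyGetD parts 0 []) then PySem.List.pyGetD parts 0 [] else []
      if filepath ≠ [] then
        let segments := PySem.Chars.splitOn filepath ['/']
        PySem.Set.add paths (PySem.Chars.join ['/'] (PySem.List.slice segments none (some (min 3 (segments.length : Int)))))
      else paths
    else paths) PySem.Set.empty
  if paths = [] then "cluster-" ++ PySem.Int.toStr index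
  else
    let sorted_paths := PySem.List.sorted paths (fun x => x) false
    if sorted_paths.length = 1 then
      let r := PySem.Chars.replace (PySem.List.pyGetD sorted_paths 0 []) ['/'] ['-']
      if r = [] then "cluster-" ++ PySem.Int.toStr index else String.ofList r
    else
      let tops := PySem.Dict.counter sorted_paths
      if tops.items ≠ [] then
        let best := (PySem.List.pyGetD (PySem.List.sorted tops.items (fun p => p.2) true) 0 ([], 0)).1
        String.ofList (PySem.Chars.replace best ['/'] ['-'])
      else "cluster-" ++ PySem.Int.toStr index

-- ===== PORT B =====
def pick_community_name_py_alt (community : List String) (index : Int) : String :=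
  let best : Option (List Char) := community.foldl (fun best node_id =>
    let parts := PySem.Chars.splitOn node_id.toList [':']
    if 2 ≤ parts.length ∧ PySem.Chars.isIn ['/'] (PySem.List.pyGetD parts 0 []) = true then
      let pre := PySem.Chars.join ['/'] (PySem.List.slice (PySem.Chars.splitOn (PySem.List.pyGetD parts 0 []) ['/']) none (some 3))
      match best with
      | none => some pre
      | some b => if pre < b then some pre else some b
    else best) none
  match best with
  | none => "cluster-" ++ PySem.Int.toStr index
  | some b => String.ofList (PySem.Chars.replace b ['/'] ['-'])

-- ===== PRECONDITION & SPEC =====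
def Spec_pick_community_name_py (community : List String) (index : Int) (out : String) : Prop := out = pick_community_name_py_alt community index
instance (community : List String) (index : Int) (out : String) : Decidable (Spec_pick_community_name_py community index out) := by unfold Spec_pick_community_name_py; infer_instance

-- ===== CLAIM (what is proved, stated in full; the proofs are below) =====
def Claim_equal_pick_community_name_py : Prop := ∀ (community : List String) (index : Int), Dom_pick_community_name_py community index → Spec_pick_community_name_py community index (pick_community_name_py community index)

-- ===== LEMMAS AND PROOFS =====

-- the prefix a single node contributes to A's `paths` set / B's running minimum (none = contributes nothing)
def pvPref (node : String) : Option (List Char) :=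
  if 2 ≤ (PySem.Chars.splitOn node.toList [':']).length ∧
      PySem.Chars.isIn ['/'] (PySem.List.pyGetD (PySem.Chars.splitOn node.toList [':']) 0 []) = true
  then some (PySem.Chars.join ['/'] (List.take 3
      (PySem.Chars.splitOn (PySem.List.pyGetD (PySem.Chars.splitOn node.toList [':']) 0 []) ['/'])))
  else none

def pvMinStep (b : Option (List Char)) (p : List Char) : Option (List Char) :=
  match b with
  | none => some p
  | some x => if p < x then some p else some x

theorem pvSorted_inst (xs : List (List Char)) (key : List Char → List Char) (rev : Bool) :
    PySem.List.sorted xs key rev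
      = @PySem.List.sorted (List Char) (List Char) List.instLinearOrder.toLT LinearOrder.toDecidableLT xs key rev := by
  rw [show (fun (a b : List Char) => a.decidableLT b) = (LinearOrder.toDecidableLT : DecidableLT (List Char)) from Subsingleton.elim _ _]

theorem pvSliceMin (xs : List (List Char)) :
    PySem.List.slice xs none (some (min 3 (xs.length : Int))) = xs.take 3 := by
  rw [PySem.List.slice_to xs (b := min 3 (xs.length : Int)) (le_min (by norm_num) (Int.natCast_nonneg _))]
  have h : (min 3 (xs.length : Int)).toNat = min 3 xs.length := by omega
  rw [h, ← List.take_length (l := xs), List.take_take]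
  simp

theorem pvSlice3 (xs : List (List Char)) :
    PySem.List.slice xs none (some 3) = xs.take 3 := by
  rw [PySem.List.slice_to xs (b := 3) (by norm_num)]
  rfl

theorem pvGoLen (sep : List Char) (fuel : Nat) (l cur : List Char) (acc : List (List Char)) :
    acc.length + 1 ≤ (PySem.Chars.splitOn.go sep fuel l cur acc).length := by
  induction fuel generalizing l cur acc with
  | zero => simp [PySem.Chars.splitOn.go]
  | succ n ih =>
    cases l with
    | nil => simp [PySem.Chars.splitOn.go]
    | cons c rest =>
      rw [PySem.Chars.splitOn.go]
      split
      · exact le_trans (by simp) (ih _ _ _)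
      · exact ih _ _ _

theorem pvGoLen2 (sep : List Char) (hsep : sep ≠ []) (fuel : Nat) (l cur : List Char) (acc : List (List Char))
    (hf : l.length ≤ fuel) (hin : sep <:+: l) :
    acc.length + 2 ≤ (PySem.Chars.splitOn.go sep fuel l cur acc).length := by
  induction fuel generalizing l cur acc with
  | zero =>
    have : l = [] := by cases l <;> simp_all
    subst this
    exact absurd (List.eq_nil_of_infix_nil hin) hsep
  | succ n ih =>
    cases l with
    | nil => exact absurd (List.eq_nil_of_infix_nil hin) hsep
    | cons c rest =>
      rw [PySem.Chars.splitOn.go]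
      split
      · have := pvGoLen sep n (List.drop sep.length (c :: rest)) [] (cur.reverse :: acc)
        simpa using le_trans (by simp) this
      · rename_i hpre
        rcases (List.infix_cons_iff).mp hin with h | h
        · exact absurd (List.isPrefixOf_iff_prefix.mpr h) (by simpa using hpre)
        · exact ih rest (c :: cur) acc (by simpa using Nat.le_of_succ_le_succ (by simpa using hf)) h

theorem pvSplitOn_two_le (s sep : List Char) (hsep : sep ≠ []) (hin : sep <:+: s) :
    2 ≤ (PySem.Chars.splitOn s sep).length := by
  have := pvGoLen2 sep hsep (s.length + 1) s [] [] (by omega) hin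
  simpa [PySem.Chars.splitOn] using this

theorem pvReplGo (fuel : Nat) (l acc : List Char) (h : acc ≠ [] ∨ l ≠ []) :
    PySem.Chars.replace.go ['/'] ['-'] fuel l acc ≠ [] := by
  induction fuel generalizing l acc with
  | zero =>
    rw [PySem.Chars.replace.go]
    rcases h with h | h <;> simp_all
  | succ n ih =>
    cases l with
    | nil =>
      rw [PySem.Chars.replace.go]
      all_goals try omega
      rcases h with h | h <;> simp_all
    | cons c rest =>
      rw [PySem.Chars.replace.go]
      split
      · exact ih _ _ (Or.inl (by simp))
      · exact ih _ _ (Or.inl (by simp))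

theorem pvReplace_ne_nil (s : List Char) (h : s ≠ []) :
    PySem.Chars.replace s ['/'] ['-'] ≠ [] := by
  rw [PySem.Chars.replace]
  simpa using pvReplGo s.length s [] (Or.inr h)

theorem pvPref_ne_nil (node : String) (p : List Char) (h : pvPref node = some p) : p ≠ [] := by
  unfold pvPref at h
  split at h
  · rename_i hc
    have hin : ['/'] <:+: PySem.List.pyGetD (PySem.Chars.splitOn node.toList [':']) 0 [] :=
      (PySem.Chars.isIn_iff_infix _ _).mp hc.2
    have h2 : 2 ≤ (PySem.Chars.splitOn (PySem.List.pyGetD (PySem.Chars.splitOn node.toList [':']) 0 []) ['/']).length :=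
      pvSplitOn_two_le _ _ (by simp) hin
    have hp : p = PySem.Chars.join ['/'] (List.take 3
        (PySem.Chars.splitOn (PySem.List.pyGetD (PySem.Chars.splitOn node.toList [':']) 0 []) ['/'])) :=
      (Option.some.inj h).symm
    subst hp
    rcases hs : PySem.Chars.splitOn (PySem.List.pyGetD (PySem.Chars.splitOn node.toList [':']) 0 []) ['/'] with _ | ⟨a, _ | ⟨b, rest⟩⟩
    · simp [hs] at h2
    · simp [hs] at h2
    · simp [PySem.Chars.join_cons_cons]
  · exact absurd h (by simp)

theorem pvA_body (paths : PySem.Set (List Char)) (node_id : String) :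
    (let parts := PySem.Chars.splitOn node_id.toList [':']
     if 2 ≤ parts.length then
       let filepath := if PySem.Chars.isIn ['/'] (PySem.List.pyGetD parts 0 []) then PySem.List.pyGetD parts 0 [] else []
       if filepath ≠ [] then
         let segments := PySem.Chars.splitOn filepath ['/']
         PySem.Set.add paths (PySem.Chars.join ['/'] (PySem.List.slice segments none (some (min 3 (segments.length : Int)))))
       else paths
     else paths)
    = match pvPref node_id with
      | some p => PySem.Set.add paths p
      | none => paths := by
  by_cases h1 : 2 ≤ (PySem.Chars.splitOn node_id.toList [':']).length
  · by_cases h2 : PySem.Chars.isIn ['/'] (PySem.List.pyGetD (PySem.Chars.splitOn node_id.toList [':']) 0 []) = true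
    · have hne : PySem.List.pyGetD (PySem.Chars.splitOn node_id.toList [':']) 0 [] ≠ [] := by
        intro e
        have := (PySem.Chars.isIn_iff_infix _ _).mp h2
        rw [e] at this
        exact absurd (List.eq_nil_of_infix_nil this) (by simp)
      simp [pvPref, h1, h2, hne, pvSliceMin]
    · simp [pvPref, h1, h2]
  · simp [pvPref, h1]

theorem pvA_fold (cs : List String) (acc : PySem.Set (List Char)) :
    cs.foldl (fun s n => match pvPref n with
      | some p => PySem.Set.add s p
      | none => s) acc
    = (cs.filterMap pvPref).foldl PySem.Set.add acc := by
  induction cs generalizing acc with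
  | nil => rfl
  | cons c t ih =>
    simp only [List.foldl_cons, List.filterMap_cons]
    cases pvPref c <;> simp [ih]

theorem pvA_paths (cs : List String) :
    cs.foldl (fun paths node_id =>
      let parts := PySem.Chars.splitOn node_id.toList [':']
      if 2 ≤ parts.length then
        let filepath := if PySem.Chars.isIn ['/'] (PySem.List.pyGetD parts 0 []) then PySem.List.pyGetD parts 0 [] else []
        if filepath ≠ [] then
          let segments := PySem.Chars.splitOn filepath ['/']
          PySem.Set.add paths (PySem.Chars.join ['/'] (PySem.List.slice segments none (some (min 3 (segments.length : Int)))))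
        else paths
      else paths) PySem.Set.empty
    = PySem.Set.ofList (cs.filterMap pvPref) := by
  rw [PySem.List.foldl_congr_mem cs _ (fun s n => match pvPref n with
      | some p => PySem.Set.add s p
      | none => s) _ (fun acc x _ => pvA_body acc x)]
  rw [pvA_fold, PySem.Set.ofList_eq_foldl]
  rfl

theorem pvB_body (b : Option (List Char)) (node_id : String) :
    (let parts := PySem.Chars.splitOn node_id.toList [':']
     if 2 ≤ parts.length ∧ PySem.Chars.isIn ['/'] (PySem.List.pyGetD parts 0 []) = true then
       let pre := PySem.Chars.join ['/'] (PySem.List.slice (PySem.Chars.splitOn (PySem.List.pyGetD parts 0 []) ['/']) none (some 3))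
       match b with
       | none => some pre
       | some x => if pre < x then some pre else some x
     else b)
    = match pvPref node_id with
      | some p => pvMinStep b p
      | none => b := by
  by_cases hc : 2 ≤ (PySem.Chars.splitOn node_id.toList [':']).length ∧
      PySem.Chars.isIn ['/'] (PySem.List.pyGetD (PySem.Chars.splitOn node_id.toList [':']) 0 []) = true
  · simp [pvPref, hc, pvMinStep, pvSlice3]
  · simp [pvPref, hc]

theorem pvB_fold (cs : List String) (acc : Option (List Char)) :
    cs.foldl (fun b n => match pvPref n with
      | some p => pvMinStep b p
      | none => b) acc
    = (cs.filterMap pvPref).foldl pvMinStep acc := by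
  induction cs generalizing acc with
  | nil => rfl
  | cons c t ih =>
    simp only [List.foldl_cons, List.filterMap_cons]
    cases pvPref c <;> simp [ih]

theorem pvMin_fold (t : List (List Char)) (a : List Char) :
    t.foldl pvMinStep (some a) = some (t.foldl min a) := by
  induction t generalizing a with
  | nil => rfl
  | cons x rest ih =>
    simp only [List.foldl_cons, pvMinStep]
    rcases lt_or_ge x a with h | h
    · rw [if_pos h, ih, min_eq_right (le_of_lt h)]
    · rw [if_neg (not_lt.mpr h), ih, min_eq_left h]

theorem pvB_best (cs : List String) :
    cs.foldl (fun best node_id =>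
      let parts := PySem.Chars.splitOn node_id.toList [':']
      if 2 ≤ parts.length ∧ PySem.Chars.isIn ['/'] (PySem.List.pyGetD parts 0 []) = true then
        let pre := PySem.Chars.join ['/'] (PySem.List.slice (PySem.Chars.splitOn (PySem.List.pyGetD parts 0 []) ['/']) none (some 3))
        match best with
        | none => some pre
        | some b => if pre < b then some pre else some b
      else best) none
    = match cs.filterMap pvPref with
      | [] => none
      | x :: t => some (t.foldl min x) := by
  rw [PySem.List.foldl_congr_mem cs _ (fun b n => match pvPref n with
      | some p => pvMinStep b p
      | none => b) _ (fun acc x _ => pvB_body acc x)]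
  rw [pvB_fold]
  cases cs.filterMap pvPref with
  | nil => rfl
  | cons x t => simpa [pvMinStep] using pvMin_fold t x

theorem pvFoldAdd_prefix (l : List (List Char)) (s : PySem.Set (List Char)) :
    ∃ r, l.foldl PySem.Set.add s = s ++ r := by
  induction l generalizing s with
  | nil => exact ⟨[], by simp⟩
  | cons x t ih =>
    simp only [List.foldl_cons, PySem.Set.add]
    split
    · exact ih s
    · obtain ⟨r, hr⟩ := ih (s ++ [x])
      exact ⟨[x] ++ r, by simp [hr]⟩

theorem pvOfList_cons (m : List Char) (tl : List (List Char)) :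
    ∃ r, PySem.Set.ofList (m :: tl) = m :: r := by
  rw [PySem.Set.ofList_eq_foldl]
  simp only [List.foldl_cons]
  have : PySem.Set.add ([] : PySem.Set (List Char)) m = [m] := by simp [PySem.Set.add, PySem.Set.contains]
  rw [this]
  obtain ⟨r, hr⟩ := pvFoldAdd_prefix tl [m]
  exact ⟨r, by simpa using hr⟩

-- ===== VERDICT (by name: the statement is the Claim_ definition above) =====
theorem pick_community_name_py_spec : Claim_equal_pick_community_name_py := by
  intro community index _
  unfold Spec_pick_community_name_py pick_community_name_py pick_community_name_py_alt
  simp only []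
  rw [pvA_paths, pvB_best]
  rcases hFM : community.filterMap pvPref with _ | ⟨x, t⟩
  · rfl
  · have hxL : x ∈ community.filterMap pvPref := by rw [hFM]; exact List.mem_cons_self
    have hSne : PySem.Set.ofList (x :: t) ≠ [] := by
      intro e
      have := (PySem.Set.mem_ofList (x :: t) x).mpr List.mem_cons_self
      rw [e] at this
      exact absurd this (by simp)
    rw [if_neg hSne]
    rcases hsp : PySem.List.sorted (PySem.Set.ofList (x :: t)) (fun x => x) false with _ | ⟨m, tl⟩
    · exact absurd ((PySem.List.sorted_eq_nil_iff _ _ _).mp hsp) hSne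
    · -- the head of the sorted deduplicated list is the running minimum
      set v := t.foldl min x with hv
      have hvmem : v ∈ x :: t := by
        rcases PySem.List.foldl_min_mem t x with h | h
        · rw [hv, h]; exact List.mem_cons_self
        · exact List.mem_cons_of_mem x (hv ▸ h)
      have hvle : ∀ y ∈ x :: t, v ≤ y := by
        intro y hy
        rcases List.mem_cons.mp hy with rfl | hy
        · exact (PySem.List.foldl_min_le t y).1
        · exact (PySem.List.foldl_min_le t x).2 y hy
      have hmmem : m ∈ x :: t := by
        have : m ∈ PySem.List.sorted (PySem.Set.ofList (x :: t)) (fun x => x) false := by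
          rw [hsp]; exact List.mem_cons_self
        exact (PySem.Set.mem_ofList _ _).mp ((PySem.List.mem_sorted _ _ _ _).mp this)
      have hmv : m = v := by
        have hsp' : @PySem.List.sorted (List Char) (List Char) List.instLinearOrder.toLT LinearOrder.toDecidableLT
            (PySem.Set.ofList (x :: t)) (fun x => x) false = m :: tl := by
          rw [← pvSorted_inst]; exact hsp
        have h1 : m ≤ v :=
          PySem.List.key_head_sorted_le _ (fun x => x) hsp' v ((PySem.Set.mem_ofList _ _).mpr hvmem)
        exact le_antisymm h1 (hvle m hmmem)
      have hmne : m ≠ [] := by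
        have : m ∈ community.filterMap pvPref := hFM ▸ hmmem
        obtain ⟨node, _, hnode⟩ := List.mem_filterMap.mp this
        exact pvPref_ne_nil node m hnode
      by_cases hlen : (m :: tl).length = 1
      · rw [if_pos hlen]
        have hget : PySem.List.pyGetD (m :: tl) 0 ([] : List Char) = m := by
          simp [PySem.List.pyGetD, PySem.List.pyGet?, PySem.List.pyIdx?]
        rw [hget, if_neg (pvReplace_ne_nil m hmne), hmv]
      · rw [if_neg hlen]
        rw [PySem.Dict.items_counter]
        obtain ⟨r', hr⟩ := pvOfList_cons m tl
        rw [hr]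
        have hperm : (m :: tl).Perm (PySem.Set.ofList (x :: t)) := by
          rw [← hsp]; exact PySem.List.sorted_perm _ _ _
        have hnd : (m :: tl).Nodup := hperm.symm.nodup (PySem.Set.nodup_ofList _)
        have hall : ∀ p ∈ (m :: r').map (fun k => (k, (List.count k (m :: tl) : Int))), p.2 = 1 := by
          intro p hp
          obtain ⟨k, hk, rfl⟩ := List.mem_map.mp hp
          have hk2 : k ∈ m :: tl := (PySem.Set.mem_ofList (m :: tl) k).mp (hr ▸ hk)
          simp [List.count_eq_one_of_mem hnd hk2]
        have hpw : ((m :: r').map (fun k => (k, (List.count k (m :: tl) : Int)))).Pairwise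
            (fun a b => (fun p => p.2) b ≤ (fun p => p.2) a) := by
          apply List.pairwise_of_forall_mem_list
          intro a ha b hb
          simp only []
          rw [hall a ha, hall b hb]
        rw [PySem.List.sorted_rev_eq_self_of_pairwise _ _ hpw]
        have hne : ((m :: r').map (fun k => (k, (List.count k (m :: tl) : Int)))) ≠ [] := by simp
        rw [if_pos hne]
        have hget : PySem.List.pyGetD ((m :: r').map (fun k => (k, (List.count k (m :: tl) : Int)))) 0
            (([] : List Char), (0 : Int)) = (m, (List.count m (m :: tl) : Int)) := by
          simp [PySem.List.pyGetD, PySem.List.pyGet?, PySem.List.pyIdx?]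
        rw [hget, hmv]
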